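-- pv_equiv track=rewrite | github.com/zuspec/zuspec-fe-pss | src/zuspec/fe/pss/__init__.py | _transform_forall_foreach
-- ===== SOURCE A (Python) =====
-- def _is_word_char(c: str) -> bool:
--     return c.isalnum() or c == '_'
--
-- def _scan_comment_or_string(text: str, i: int) -> int:
--     """Return end index after a comment or string at i, or -1 if not at one."""
--     n = len(text)
--     if text[i:i+2] == '//':
--         end = text.find('\n', i)
--         return n if end == -1 else end + 1
--     if text[i:i+2] == '/*':
--         end = text.find('*/', i + 2)
--         return n if end == -1 else end + 2
--     if text[i] == '"':
--         j = i + 1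
--         while j < n and text[j] != '"':
--             if text[j] == '\\':
--                 j += 1
--             j += 1
--         return min(j + 1, n)
--     return -1
--
-- def _find_matching_brace(text: str, start: int) -> int:
--     """Given text[start] == '{', return index of matching '}'. Returns -1 if not found."""
--     n = len(text)
--     depth = 0
--     i = start
--     while i < n:
--         end = _scan_comment_or_string(text, i)
--         if end != -1:
--             i = end
--             continue
--         if text[i] == '{':
--             depth += 1
--         elif text[i] == '}':
--             depth -= 1
--             if depth == 0:
--                 return i
--         i += 1
--     return -1
--
-- def _transform_forall_foreach(text: str, stub_body: bool) -> str:
--     """Rename the PSS 'forall' keyword to 'foreach' throughout text.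
--
--     If stub_body is True, also replace each renamed block's body with
--     '{ 0 == 0; }' so the pssparser linker doesn't fail on p.x references.
--     If stub_body is False, only rename the keyword (for pass-1 annotation capture).
--     """
--     result = []
--     i = 0
--     n = len(text)
--     while i < n:
--         end = _scan_comment_or_string(text, i)
--         if end != -1:
--             result.append(text[i:end])
--             i = end
--             continue
--
--         if (text[i:i+6] == 'forall'
--                 and (i == 0 or not _is_word_char(text[i-1]))
--                 and (i+6 >= n or not _is_word_char(text[i+6]))):
--             result.append('foreach')
--             i += 6
--
--             if stub_body:
--                 # Copy whitespace before '('
--                 while i < n and text[i] in ' \t\n\r':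
--                     result.append(text[i]); i += 1
--                 # Copy '(...)' verbatim, tracking depth through comments/strings
--                 if i < n and text[i] == '(':
--                     depth = 0
--                     while i < n:
--                         end2 = _scan_comment_or_string(text, i)
--                         if end2 != -1:
--                             result.append(text[i:end2]); i = end2; continue
--                         c = text[i]
--                         result.append(c); i += 1
--                         if c == '(':
--                             depth += 1
--                         elif c == ')':
--                             depth -= 1
--                             if depth == 0:
--                                 break
--                 # Copy whitespace before '{'
--                 while i < n and text[i] in ' \t\n\r':
--                     result.append(text[i]); i += 1
--                 # Replace body block with trivially-true stub
--                 if i < n and text[i] == '{':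
--                     end3 = _find_matching_brace(text, i)
--                     if end3 != -1:
--                         result.append('{ 0 == 0; }')
--                         i = end3 + 1
--                     else:
--                         result.append(text[i]); i += 1
--             continue
--
--         result.append(text[i])
--         i += 1
--     return ''.join(result)
-- ===== SOURCE B (Python) =====
-- # B: two-pass re-implementation — pass 1 tokenizes the text into protected
-- # comment/string spans (scanned char-by-char, no str.find), maximal word runs
-- # and single characters; pass 2 walks the token list, renaming 'forall' word
-- # tokens and stubbing the following (...) { ... } body when stub_body is set.
--
-- def _is_word(c):
--     return c.isalnum() or c == '_'
--
-- def _is_ws(c):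
--     return c in ' \t\n\r'
--
-- def _line_len(text, i):
--     # chars of a '//' comment body from i: up to and including '\n', else to end
--     k = 0
--     n = len(text)
--     while i + k < n:
--         k += 1
--         if text[i + k - 1] == '\n':
--             break
--     return k
--
-- def _block_len(text, i):
--     # chars of a '/*' comment body from i: up to and including '*/', else to end
--     k = 0
--     n = len(text)
--     while i + k < n:
--         if text[i + k] == '*' and i + k + 1 < n and text[i + k + 1] == '/':
--             return k + 2
--         k += 1
--     return k
--
-- def _quote_len(text, i):
--     # chars of a string body after the opening quote: backslash-skip scan,
--     # clamped at the end of the text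
--     k = 0
--     n = len(text)
--     while i + k < n:
--         c = text[i + k]
--         if c == '"':
--             return k + 1
--         if c == '\\':
--             if i + k + 1 >= n:
--                 return k + 1
--             k += 2
--         else:
--             k += 1
--     return k
--
-- def _span_len(text, i):
--     # length of the protected comment/string span starting at i, 0 if none
--     c = text[i]
--     if c == '/' and text[i+1:i+2] == '/':
--         return 2 + _line_len(text, i + 2)
--     if c == '/' and text[i+1:i+2] == '*':
--         return 2 + _block_len(text, i + 2)
--     if c == '"':
--         return 1 + _quote_len(text, i + 1)
--     return 0
--
-- def _tokenize(text):
--     # pass 1: protected spans / maximal word runs / single characters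
--     toks = []
--     i, n = 0, len(text)
--     while i < n:
--         k = _span_len(text, i)
--         if k:
--             toks.append(('prot', text[i:i+k])); i += k
--         elif _is_word(text[i]):
--             m = i + 1
--             while m < n and _is_word(text[m]):
--                 m += 1
--             toks.append(('word', text[i:m])); i = m
--         else:
--             toks.append(('ch', text[i])); i += 1
--     return toks
--
-- def _copy_ws(toks, i, out):
--     while i < len(toks) and toks[i][0] == 'ch' and _is_ws(toks[i][1]):
--         out.append(toks[i][1]); i += 1
--     return i
--
-- def _copy_parens(toks, i, out):
--     depth = 0
--     while i < len(toks):
--         kind, val = toks[i]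
--         out.append(val); i += 1
--         if kind == 'ch':
--             if val == '(':
--                 depth += 1
--             elif val == ')':
--                 depth -= 1
--                 if depth == 0:
--                     break
--     return i
--
-- def _match_brace(toks, i):
--     depth = 1
--     while i < len(toks):
--         kind, val = toks[i]
--         i += 1
--         if kind == 'ch':
--             if val == '{':
--                 depth += 1
--             elif val == '}':
--                 depth -= 1
--                 if depth == 0:
--                     return i
--     return -1
--
-- def _stub_block(toks, i, out):
--     if i < len(toks) and toks[i] == ('ch', '{'):
--         j = _match_brace(toks, i + 1)
--         if j == -1:
--             out.append('{'); return i + 1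
--         out.append('{ 0 == 0; }'); return j
--     return i
--
-- def _transform_forall_foreach(text, stub_body):
--     toks = _tokenize(text)
--     out = []
--     i, n = 0, len(toks)
--     while i < n:
--         kind, val = toks[i]; i += 1
--         if kind == 'word' and val == 'forall':
--             out.append('foreach')
--             if stub_body:
--                 i = _copy_ws(toks, i, out)
--                 if i < n and toks[i] == ('ch', '('):
--                     i = _copy_parens(toks, i, out)
--                 i = _copy_ws(toks, i, out)
--                 i = _stub_block(toks, i, out)
--         else:
--             out.append(val)
--     return ''.join(out)
-- ===== Notes on version B (the rewrite author's own statement) =====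
-- stated objective: alternative
-- what changed: A's single fused index-cursor loop (which rescans with str.find inside) is replaced by two passes: a tokenizer that splits the text into protected comment/string spans (found by dedicated char-by-char span-length scanners instead of str.find), maximal word runs and single characters, and a second pass over the token list that renames word tokens equal to 'forall' (word boundaries come for free from run maximality) and does the whitespace/paren/brace stubbing by walking tokens instead of characters.
import Mathlib
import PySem

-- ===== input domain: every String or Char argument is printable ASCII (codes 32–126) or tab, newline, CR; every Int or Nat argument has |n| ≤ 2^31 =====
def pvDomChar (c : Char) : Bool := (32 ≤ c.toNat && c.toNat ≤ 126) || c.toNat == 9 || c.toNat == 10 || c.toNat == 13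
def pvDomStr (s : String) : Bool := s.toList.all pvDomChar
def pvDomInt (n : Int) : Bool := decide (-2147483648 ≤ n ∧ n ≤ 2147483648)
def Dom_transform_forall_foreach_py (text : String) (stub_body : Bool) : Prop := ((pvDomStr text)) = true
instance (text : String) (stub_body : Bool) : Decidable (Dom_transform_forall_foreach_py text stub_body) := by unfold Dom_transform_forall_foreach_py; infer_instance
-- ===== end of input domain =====

-- B is an ALTERNATIVE decomposition (tokenize into protected spans / word runs /
-- chars with char-by-char span scanners, then a second pass renames and stubs);
-- same output, no speed claim.

-- ===== PORT A =====
-- isalnum() or '_' (exact on the printable-ASCII domain)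
def isWordChar (c : Char) : Bool := c.isAlphanum || c = '_'

def isWS (c : Char) : Bool := c = ' ' || c = '\t' || c = '\n' || c = '\r'

-- text.find('\n', i), relative to the suffix (none = -1)
def findNl : List Char → Option Nat
  | [] => none
  | c :: t => if c = '\n' then some 0 else (findNl t).map (· + 1)

-- text.find('*/', i), relative to the suffix (none = -1)
def findCC : List Char → Option Nat
  | [] => none
  | c :: t => if c = '*' ∧ t.head? = some '/' then some 0 else (findCC t).map (· + 1)

-- the j-loop of the string case: chars advanced past the opening quote (j - (i+1))
def strLen : List Char → Nat
  | [] => 0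
  | c :: t =>
    if c = '"' then 0
    else if c = '\\' then 2 + strLen (t.drop 1)
    else 1 + strLen t
  termination_by l => l.length
  decreasing_by all_goals (simp; all_goals omega)

-- _scan_comment_or_string, cursor carried as suffix: some k = chars consumed (end-i), none = -1
def scanCS (s : List Char) : Option Nat :=
  if s.take 2 = ['/', '/'] then
    some (match findNl s with | none => s.length | some e => e + 1)
  else if s.take 2 = ['/', '*'] then
    some (match findCC (s.drop 2) with | none => s.length | some e => e + 4)
  else if s.head? = some '"' then
    some (min (strLen s.tail + 2) s.length)
  else none

-- ws-copy loop: number of leading whitespace chars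
def wsA : List Char → Nat
  | [] => 0
  | c :: t => if isWS c then 1 + wsA t else 0

-- the '(...)'-copy loop of A: (emitted chars, chars consumed).
-- 'max 1 k' only makes totality evident: scanCS never returns some 0 (proved in scanCS_pos below).
def parenA : List Char → Int → List Char × Nat
  | [], _ => ([], 0)
  | c :: t, depth =>
    match scanCS (c :: t) with
    | some k =>
      let p := parenA ((c :: t).drop (max 1 k)) depth
      ((c :: t).take k ++ p.1, max 1 k + p.2)
    | none =>
      if c = '(' then
        let p := parenA t (depth + 1); (c :: p.1, p.2 + 1)
      else if c = ')' then
        if depth - 1 = 0 then ([c], 1)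
        else let p := parenA t (depth - 1); (c :: p.1, p.2 + 1)
      else
        let p := parenA t depth; (c :: p.1, p.2 + 1)
  termination_by s _ => s.length
  decreasing_by all_goals (simp; all_goals omega)

-- _find_matching_brace, relative: offset of the matching '}' from the cursor
def braceFindA : List Char → Int → Option Nat
  | [], _ => none
  | c :: t, depth =>
    match scanCS (c :: t) with
    | some k => (braceFindA ((c :: t).drop (max 1 k)) depth).map (· + max 1 k)
    | none =>
      if c = '{' then (braceFindA t (depth + 1)).map (· + 1)
      else if c = '}' then
        if depth - 1 = 0 then some 0
        else (braceFindA t (depth - 1)).map (· + 1)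
      else (braceFindA t depth).map (· + 1)
  termination_by s _ => s.length
  decreasing_by all_goals (simp; all_goals omega)

def stubL : List Char := ['{', ' ', '0', ' ', '=', '=', ' ', '0', ';', ' ', '}']
def forallL : List Char := ['f', 'o', 'r', 'a', 'l', 'l']
def foreachL : List Char := ['f', 'o', 'r', 'e', 'a', 'c', 'h']

-- the '{'-replacement step of A's stub_body block: (emitted, chars consumed, last char consumed here)
def braceStepA (s3 : List Char) : List Char × Nat × Option Char :=
  if s3.head? = some '{' then
    match braceFindA s3 0 with
    | some j => (stubL, j + 1, s3[j]?)
    | none => (['{'], 1, s3.head?)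
  else ([], 0, none)

-- A's stub_body block after 'foreach': (emitted chars, chars consumed, last char consumed)
def stubA (s : List Char) : List Char × Nat × Option Char :=
  let k1 := wsA s
  let s1 := s.drop k1
  let p := if s1.head? = some '(' then parenA s1 0 else ([], 0)
  let s2 := s1.drop p.2
  let k3 := wsA s2
  let s3 := s2.drop k3
  let b := braceStepA s3
  (s.take k1 ++ p.1 ++ s2.take k3 ++ b.1, k1 + p.2 + k3 + b.2.1,
    (b.2.2).or (((s2.take k3).getLast?).or ((p.1.getLast?).or ((s.take k1).getLast?))))

-- A's main while-loop; the cursor i is the dropped prefix, pW = _is_word_char(text[i-1])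
-- (False at i == 0)
def loopA (stub : Bool) (pW : Bool) : List Char → List Char
  | [] => []
  | c :: t =>
    match scanCS (c :: t) with
    | some k =>
      (c :: t).take k ++
        loopA stub ((((c :: t)[k - 1]?).map isWordChar).getD false) ((c :: t).drop (max 1 k))
    | none =>
      if (c :: t).take 6 = forallL ∧ pW = false ∧
          (((c :: t)[6]?).all fun a => !isWordChar a) then
        foreachL ++
          (if stub then
            let q := stubA ((c :: t).drop 6)
            q.1 ++ loopA stub (match q.2.2 with | none => true | some a => isWordChar a)
              ((c :: t).drop (6 + q.2.1))
          else loopA stub true ((c :: t).drop 6))  -- prev char is 'l', a word char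
      else
        c :: loopA stub (isWordChar c) t
  termination_by s => s.length
  decreasing_by all_goals (simp; all_goals omega)

def transform_forall_foreach_py (text : String) (stub_body : Bool) : String :=
  String.ofList (loopA stub_body false text.toList)

-- ===== PORT B =====
inductive Tok where
  | prot : List Char → Tok
  | word : List Char → Tok
  | ch : Char → Tok
deriving DecidableEq

-- _line_len: chars of a '//' comment body: up to and including '\n', else all
def lineLen : List Char → Nat
  | [] => 0
  | c :: t => if c = '\n' then 1 else 1 + lineLen t

-- _block_len: chars of a '/*' comment body: up to and including '*/', else all
def blockLen : List Char → Nat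
  | [] => 0
  | [_] => 1
  | c :: d :: t => if c = '*' ∧ d = '/' then 2 else 1 + blockLen (d :: t)

-- _quote_len: chars of a string body after the opening quote (backslash-skip,
-- clamped at the end of the text)
def quoteLen : List Char → Nat
  | [] => 0
  | [_] => 1
  | c :: d :: t =>
    if c = '"' then 1
    else if c = '\\' then 2 + quoteLen t
    else 1 + quoteLen (d :: t)

-- _span_len: length of the protected span at the head of the suffix (0 = none)
def spanLen : List Char → Nat
  | [] => 0
  | c :: t =>
    if c = '/' ∧ t.head? = some '/' then 2 + lineLen (t.drop 1)
    else if c = '/' ∧ t.head? = some '*' then 2 + blockLen (t.drop 1)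
    else if c = '"' then 1 + quoteLen t
    else 0

-- pass 1 (_tokenize): protected spans / maximal word runs / single characters
def tokenize : List Char → List Tok
  | [] => []
  | c :: t =>
    if h : spanLen (c :: t) = 0 then
      if isWordChar c then
        .word (c :: t.takeWhile isWordChar) :: tokenize (t.dropWhile isWordChar)
      else .ch c :: tokenize t
    else
      .prot ((c :: t).take (spanLen (c :: t))) :: tokenize ((c :: t).drop (spanLen (c :: t)))
  termination_by s => s.length
  decreasing_by
  all_goals first
  | exact Nat.lt_succ_of_le (List.length_dropWhile_le _ _)
  | (simp; all_goals omega)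

-- _copy_ws over tokens: (emitted chars, remaining tokens)
def wsT : List Tok → List Char × List Tok
  | Tok.ch c :: ts =>
    if isWS c then ((c :: (wsT ts).1), (wsT ts).2) else ([], Tok.ch c :: ts)
  | ts => ([], ts)

-- _copy_parens over tokens: (emitted chars, remaining tokens)
def parenT : List Tok → Int → List Char × List Tok
  | [], _ => ([], [])
  | Tok.prot cs :: ts, d => ((cs ++ (parenT ts d).1), (parenT ts d).2)
  | Tok.word w :: ts, d => ((w ++ (parenT ts d).1), (parenT ts d).2)
  | Tok.ch c :: ts, d =>
    if c = '(' then ((c :: (parenT ts (d + 1)).1), (parenT ts (d + 1)).2)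
    else if c = ')' then
      if d - 1 = 0 then ([c], ts)
      else ((c :: (parenT ts (d - 1)).1), (parenT ts (d - 1)).2)
    else ((c :: (parenT ts d).1), (parenT ts d).2)

-- _match_brace over tokens: remaining tokens after the matching '}' (none = -1)
def braceT : List Tok → Int → Option (List Tok)
  | [], _ => none
  | Tok.ch c :: ts, d =>
    if c = '{' then braceT ts (d + 1)
    else if c = '}' then
      if d - 1 = 0 then some ts else braceT ts (d - 1)
    else braceT ts d
  | _ :: ts, d => braceT ts d

-- _stub_block over tokens: stub (or copy) a '{...}' block at the head
def braceStepT : List Tok → List Char × List Tok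
  | Tok.ch c :: ts =>
    if c = '{' then
      match braceT ts 1 with
      | some rest => ("{ 0 == 0; }".toList, rest)
      | none => (['{'], ts)
    else ([], Tok.ch c :: ts)
  | ts => ([], ts)

-- the four token-level length bounds cited by pass2's termination proof
theorem wsT_len : ∀ ts : List Tok, (wsT ts).2.length ≤ ts.length := by
  intro ts
  induction ts with
  | nil => simp [wsT]
  | cons a ts ih =>
    cases a with
    | ch c =>
      by_cases h : isWS c
      · simp only [wsT, if_pos h]; exact le_trans ih (by simp)
      · simp [wsT, h]
    | prot cs => simp [wsT]
    | word w => simp [wsT]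

theorem parenT_len : ∀ (ts : List Tok) (d : Int), (parenT ts d).2.length ≤ ts.length := by
  intro ts
  induction ts with
  | nil => intro d; simp [parenT]
  | cons a ts ih =>
    intro d
    cases a with
    | prot cs => simp only [parenT]; exact le_trans (ih d) (by simp)
    | word w => simp only [parenT]; exact le_trans (ih d) (by simp)
    | ch c =>
      simp only [parenT]
      split_ifs with h1 h2 h3
      · exact le_trans (ih (d + 1)) (by simp)
      · simp
      · exact le_trans (ih (d - 1)) (by simp)
      · exact le_trans (ih d) (by simp)

theorem braceT_len : ∀ (ts : List Tok) (d : Int) (r : List Tok),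
    braceT ts d = some r → r.length ≤ ts.length := by
  intro ts
  induction ts with
  | nil => intro d r h; simp [braceT] at h
  | cons a ts ih =>
    intro d r h
    cases a with
    | prot cs => exact le_trans (ih d r (by simpa [braceT] using h)) (by simp)
    | word w => exact le_trans (ih d r (by simpa [braceT] using h)) (by simp)
    | ch c =>
      simp only [braceT] at h
      split_ifs at h with h1 h2 h3
      · exact le_trans (ih (d + 1) r h) (by simp)
      · cases h; simp
      · exact le_trans (ih (d - 1) r h) (by simp)
      · exact le_trans (ih d r h) (by simp)

theorem braceStepT_len : ∀ ts : List Tok, (braceStepT ts).2.length ≤ ts.length := by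
  intro ts
  cases ts with
  | nil => simp [braceStepT]
  | cons a ts =>
    cases a with
    | prot cs => simp [braceStepT]
    | word w => simp [braceStepT]
    | ch c =>
      by_cases h : c = '{'
      · subst h
        simp only [braceStepT, if_pos rfl]
        cases hb : braceT ts 1 with
        | none => simp
        | some rest => exact le_trans (braceT_len ts 1 rest hb) (by simp)
      · simp [braceStepT, h]

-- the whole post-'foreach' step over tokens: (emitted chars, remaining tokens)
def stubT (ts : List Tok) : List Char × List Tok :=
  let p1 := wsT ts
  let p2 := if p1.2.head? = some (Tok.ch '(') then parenT p1.2 0 else ([], p1.2)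
  let p3 := wsT p2.2
  let b := braceStepT p3.2
  (p1.1 ++ p2.1 ++ p3.1 ++ b.1, b.2)

theorem stubT_len (ts : List Tok) : (stubT ts).2.length ≤ ts.length := by
  unfold stubT
  refine le_trans (braceStepT_len _) (le_trans (wsT_len _) (le_trans ?_ (wsT_len ts)))
  split_ifs with h
  · exact parenT_len _ 0
  · exact le_rfl

-- pass 2: render the token list, renaming 'forall' and stubbing bodies
def pass2 (stub : Bool) : List Tok → List Char
  | [] => []
  | Tok.prot cs :: ts => cs ++ pass2 stub ts
  | Tok.word w :: ts =>
    if w = "forall".toList then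
      "foreach".toList ++
        (if stub then (stubT ts).1 ++ pass2 stub (stubT ts).2 else pass2 stub ts)
    else w ++ pass2 stub ts
  | Tok.ch c :: ts => c :: pass2 stub ts
  termination_by ts => ts.length
  decreasing_by
  all_goals first
  | exact Nat.lt_succ_of_le (stubT_len _)
  | (simp; all_goals omega)

def transform_forall_foreach_py_alt (text : String) (stub_body : Bool) : String :=
  String.ofList (pass2 stub_body (tokenize text.toList))

-- ===== PRECONDITION & SPEC =====
def Spec_transform_forall_foreach_py (text : String) (stub_body : Bool) (out : String) : Prop := out = transform_forall_foreach_py_alt text stub_body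
instance (text : String) (stub_body : Bool) (out : String) : Decidable (Spec_transform_forall_foreach_py text stub_body out) := by unfold Spec_transform_forall_foreach_py; infer_instance

-- ===== CLAIM (what is proved, stated in full; the proofs are below) =====
def Claim_equal_transform_forall_foreach_py : Prop := ∀ (text : String) (stub_body : Bool), Dom_transform_forall_foreach_py text stub_body → Spec_transform_forall_foreach_py text stub_body (transform_forall_foreach_py text stub_body)

-- ===== LEMMAS AND PROOFS =====

theorem findNl_spec : ∀ {s : List Char} {e : Nat}, findNl s = some e → s[e]? = some '\n' := by
  intro s
  induction s with
  | nil => intro e h; simp [findNl] at h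
  | cons c t ih =>
    intro e h
    by_cases hc : c = '\n'
    · simp [findNl, hc] at h; subst h; simp [hc]
    · simp [findNl, hc] at h
      obtain ⟨e', he', rfl⟩ := h
      simpa using ih he'

theorem findCC_spec : ∀ {s : List Char} {e : Nat}, findCC s = some e → s[e + 1]? = some '/' := by
  intro s
  induction s with
  | nil => intro e h; simp [findCC] at h
  | cons c t ih =>
    intro e h
    by_cases hc : c = '*' ∧ t.head? = some '/'
    · simp [findCC, hc] at h
      subst h
      cases t with
      | nil => simp at hc
      | cons d t' => simp_all
    · simp [findCC, hc] at h
      obtain ⟨e', he', rfl⟩ := h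
      simpa using ih he'

theorem strLen_spec : ∀ s : List Char, s.length ≤ strLen s ∨ s[strLen s]? = some '"' := by
  intro s
  induction s using strLen.induct with
  | case1 => left; simp
  | case2 t => right; simp [strLen]
  | case3 t h ih =>
    rw [strLen, if_neg h, if_pos rfl]
    rcases ih with ih | ih
    · left; simp at ih ⊢; omega
    · right
      cases t with
      | nil => simp at ih
      | cons d t' =>
        simp only [List.drop_succ_cons, List.drop_zero] at ih ⊢
        rw [show 2 + strLen t' = strLen t' + 1 + 1 by omega]
        simpa using ih
  | case4 c t h1 h2 ih =>
    rw [strLen, if_neg h1, if_neg h2]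
    rcases ih with ih | ih
    · left; simp; omega
    · right; rw [show 1 + strLen t = strLen t + 1 by omega]; simpa using ih

theorem scanCS_pos {s : List Char} {k : Nat} (h : scanCS s = some k) :
    1 ≤ k ∧ k ≤ s.length := by
  unfold scanCS at h
  split_ifs at h with h1 h2 h3
  · have hlen : 1 ≤ s.length := by
      cases s with
      | nil => simp at h1
      | cons c t => simp
    cases hf : findNl s with
    | none => rw [hf] at h; simp at h; omega
    | some e =>
      rw [hf] at h; simp at h
      have := findNl_spec hf
      have : e < s.length := by
        by_contra hc
        rw [List.getElem?_eq_none (by omega)] at this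
        simp at this
      omega
  · have hlen : 2 ≤ s.length := by
      have := congrArg List.length h2
      simp [List.length_take] at this
      omega
    cases hf : findCC (s.drop 2) with
    | none => rw [hf] at h; simp at h; omega
    | some e =>
      rw [hf] at h; simp at h
      have := findCC_spec hf
      have : e + 1 < (s.drop 2).length := by
        by_contra hc
        rw [List.getElem?_eq_none (by omega)] at this
        simp at this
      simp [List.length_drop] at this
      omega
  · have hlen : 1 ≤ s.length := by
      cases s with
      | nil => simp at h3
      | cons c t => simp
    simp at h
    omega

-- character-class facts
theorem scanCS_none_of {c : Char} {t : List Char} (h1 : c ≠ '/') (h2 : c ≠ '"') :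
    scanCS (c :: t) = none := by
  unfold scanCS
  simp [h1, h2]

theorem word_facts {c : Char} (h : isWordChar c = true) :
    c ≠ '/' ∧ c ≠ '"' ∧ c ≠ '(' ∧ c ≠ ')' ∧ c ≠ '{' ∧ c ≠ '}' ∧ isWS c = false := by
  refine ⟨?_, ?_, ?_, ?_, ?_, ?_, ?_⟩ <;>
    first
    | (rintro rfl; exact absurd h (by decide))
    | (by_contra hw
       simp only [Bool.not_eq_false] at hw
       rcases (by simpa [isWS] using hw : ((c = ' ' ∨ c = '\t') ∨ c = '\n') ∨ c = '\r') with
         ((rfl | rfl) | rfl) | rfl <;> exact absurd h (by decide))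

theorem ws_facts {c : Char} (h : isWS c = true) :
    c ≠ '/' ∧ c ≠ '"' ∧ c ≠ '(' ∧ c ≠ '{' ∧ isWordChar c = false := by
  rcases (by simpa [isWS] using h : ((c = ' ' ∨ c = '\t') ∨ c = '\n') ∨ c = '\r') with
    ((rfl | rfl) | rfl) | rfl <;> refine ⟨by decide, by decide, by decide, by decide, by decide⟩

theorem scanCS_word_none {c : Char} (t : List Char) (h : isWordChar c = true) :
    scanCS (c :: t) = none :=
  scanCS_none_of (word_facts h).1 (word_facts h).2.1

theorem scanCS_some_head {c : Char} {t : List Char} {k : Nat} (h : scanCS (c :: t) = some k) :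
    c = '/' ∨ c = '"' := by
  by_contra hc
  push Not at hc
  rw [scanCS_none_of hc.1 hc.2] at h
  cases h

-- unfold lemmas (the 'max 1 k' guard disappears: scanCS_pos gives 1 ≤ k)
theorem parenA_eq_some {c : Char} {t : List Char} {k : Nat} (hs : scanCS (c :: t) = some k)
    (depth : Int) :
    parenA (c :: t) depth =
      ((c :: t).take k ++ (parenA ((c :: t).drop k) depth).1,
        k + (parenA ((c :: t).drop k) depth).2) := by
  have h1 : max 1 k = k := Nat.max_eq_right (scanCS_pos hs).1
  simp only [parenA]
  split
  · next k' heq => rw [hs] at heq; cases heq; rw [h1]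
  · next heq => simp [hs] at heq

theorem parenA_eq_none {c : Char} {t : List Char} (hs : scanCS (c :: t) = none) (depth : Int) :
    parenA (c :: t) depth =
      (if c = '(' then
        ((c :: (parenA t (depth + 1)).1), (parenA t (depth + 1)).2 + 1)
      else if c = ')' then
        if depth - 1 = 0 then ([c], 1)
        else ((c :: (parenA t (depth - 1)).1), (parenA t (depth - 1)).2 + 1)
      else ((c :: (parenA t depth).1), (parenA t depth).2 + 1)) := by
  simp only [parenA]
  split
  · next k' heq => simp [hs] at heq
  · rfl

theorem braceFindA_eq_some {c : Char} {t : List Char} {k : Nat} (hs : scanCS (c :: t) = some k)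
    (depth : Int) :
    braceFindA (c :: t) depth = (braceFindA ((c :: t).drop k) depth).map (· + k) := by
  have h1 : max 1 k = k := Nat.max_eq_right (scanCS_pos hs).1
  simp only [braceFindA]
  split
  · next k' heq => rw [hs] at heq; cases heq; rw [h1]
  · next heq => simp [hs] at heq

theorem braceFindA_eq_none {c : Char} {t : List Char} (hs : scanCS (c :: t) = none)
    (depth : Int) :
    braceFindA (c :: t) depth =
      (if c = '{' then (braceFindA t (depth + 1)).map (· + 1)
      else if c = '}' then
        if depth - 1 = 0 then some 0
        else (braceFindA t (depth - 1)).map (· + 1)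
      else (braceFindA t depth).map (· + 1)) := by
  simp only [braceFindA]
  split
  · next k' heq => simp [hs] at heq
  · rfl

theorem loopA_eq_some {c : Char} {t : List Char} {k : Nat} (hs : scanCS (c :: t) = some k)
    (stub pW : Bool) :
    loopA stub pW (c :: t) =
      (c :: t).take k ++
        loopA stub ((((c :: t)[k - 1]?).map isWordChar).getD false) ((c :: t).drop k) := by
  have h1 : max 1 k = k := Nat.max_eq_right (scanCS_pos hs).1
  simp only [loopA]
  split
  · next k' heq => rw [hs] at heq; cases heq; rw [h1]
  · next heq => simp [hs] at heq

theorem loopA_eq_none {c : Char} {t : List Char} (hs : scanCS (c :: t) = none)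
    (stub pW : Bool) :
    loopA stub pW (c :: t) =
      (if (c :: t).take 6 = forallL ∧ pW = false ∧
          (((c :: t)[6]?).all fun a => !isWordChar a) then
        foreachL ++
          (if stub then
            (stubA ((c :: t).drop 6)).1 ++
              loopA stub
                (match (stubA ((c :: t).drop 6)).2.2 with
                  | none => true
                  | some a => isWordChar a)
                ((c :: t).drop (6 + (stubA ((c :: t).drop 6)).2.1))
          else loopA stub true ((c :: t).drop 6))
      else c :: loopA stub (isWordChar c) t) := by
  simp only [loopA]
  split
  · next k' heq => simp [hs] at heq
  · rfl

-- ---- B's span scanner agrees with A's _scan_comment_or_string ----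

theorem lineLen_eq (t : List Char) :
    lineLen t = ((findNl t).map (· + 1)).getD t.length := by
  induction t with
  | nil => simp [lineLen, findNl]
  | cons c t ih =>
    by_cases hc : c = '\n'
    · simp [lineLen, findNl, hc]
    · rw [show lineLen (c :: t) = 1 + lineLen t from by rw [lineLen, if_neg hc],
        show findNl (c :: t) = (findNl t).map (· + 1) from by rw [findNl, if_neg hc]]
      cases hf : findNl t with
      | none => rw [hf] at ih; simp [ih] <;> omega
      | some e => rw [hf] at ih; simp [ih] <;> omega

theorem blockLen_eq (t : List Char) :
    blockLen t = ((findCC t).map (· + 2)).getD t.length := by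
  induction t using blockLen.induct with
  | case1 => simp [blockLen, findCC]
  | case2 c => simp [blockLen, findCC]
  | case3 c d t h =>
    obtain ⟨rfl, rfl⟩ := h
    rw [show blockLen ('*' :: '/' :: t) = 2 from by rw [blockLen, if_pos ⟨rfl, rfl⟩],
      show findCC ('*' :: '/' :: t) = some 0 from by rw [findCC, if_pos ⟨rfl, rfl⟩]]
    simp
  | case4 c d t h ih =>
    have hcond : ¬(c = '*' ∧ (d :: t).head? = some '/') := by simpa using h
    rw [show blockLen (c :: d :: t) = 1 + blockLen (d :: t) from by rw [blockLen, if_neg h],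
      show findCC (c :: d :: t) = (findCC (d :: t)).map (· + 1) from by
        rw [findCC, if_neg hcond]]
    cases hf : findCC (d :: t) with
    | none => rw [hf] at ih; simp [ih] <;> omega
    | some e => rw [hf] at ih; simp [ih] <;> omega

theorem quoteLen_eq (t : List Char) : quoteLen t = min (strLen t + 1) t.length := by
  induction t using quoteLen.induct with
  | case1 => simp [quoteLen, strLen]
  | case2 c =>
    by_cases h1 : c = '"'
    · simp [quoteLen, strLen, h1]
    · by_cases h2 : c = '\\' <;> simp [quoteLen, strLen, h1, h2]
  | case3 d t =>
    simp [quoteLen, strLen]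
  | case4 d t h1 ih =>
    rw [show quoteLen ('\\' :: d :: t) = 2 + quoteLen t from by
        rw [quoteLen, if_neg h1, if_pos rfl],
      show strLen ('\\' :: d :: t) = 2 + strLen t from by
        rw [strLen, if_neg h1, if_pos rfl]; simp]
    simp [ih] <;> omega
  | case5 c d t h1 h2 ih =>
    rw [show quoteLen (c :: d :: t) = 1 + quoteLen (d :: t) from by
        rw [quoteLen, if_neg h1, if_neg h2],
      show strLen (c :: d :: t) = 1 + strLen (d :: t) from by
        rw [strLen, if_neg h1, if_neg h2]]
    simp [ih] <;> omega

theorem take2_iff {c a b : Char} (t : List Char) :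
    (c :: t).take 2 = [a, b] ↔ (c = a ∧ t.head? = some b) := by
  cases t with
  | nil => simp
  | cons d t' => simp

theorem spanLen_eq (s : List Char) : spanLen s = (scanCS s).getD 0 := by
  cases s with
  | nil => simp [spanLen, scanCS]
  | cons c t =>
    by_cases h1 : c = '/' ∧ t.head? = some '/'
    · obtain ⟨rfl, ht⟩ := h1
      cases t with
      | nil => simp at ht
      | cons d tr =>
        simp only [List.head?_cons, Option.some.injEq] at ht
        subst ht
        rw [show spanLen ('/' :: '/' :: tr) = 2 + lineLen tr from by
          rw [spanLen, if_pos ⟨rfl, rfl⟩]; rfl]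
        rw [show scanCS ('/' :: '/' :: tr) =
            some (match findNl ('/' :: '/' :: tr) with
              | none => ('/' :: '/' :: tr).length | some e => e + 1) from by
          unfold scanCS; rw [if_pos (by simp)]]
        rw [lineLen_eq]
        rw [show findNl ('/' :: '/' :: tr) = ((findNl tr).map (· + 1)).map (· + 1) from by
          simp [findNl]]
        cases hf : findNl tr with
        | none => simp [Nat.add_comm, Nat.add_left_comm]
        | some e => simp [Nat.add_comm, Nat.add_left_comm]
    · by_cases h2 : c = '/' ∧ t.head? = some '*'
      · obtain ⟨rfl, ht⟩ := h2
        cases t with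
        | nil => simp at ht
        | cons d tr =>
          simp only [List.head?_cons, Option.some.injEq] at ht
          subst ht
          rw [show spanLen ('/' :: '*' :: tr) = 2 + blockLen tr from by
            rw [spanLen, if_neg (by simp), if_pos ⟨rfl, rfl⟩]; rfl]
          rw [show scanCS ('/' :: '*' :: tr) =
              some (match findCC tr with
                | none => ('/' :: '*' :: tr).length | some e => e + 4) from by
            unfold scanCS; rw [if_neg (by simp), if_pos (by simp)]; rfl]
          rw [blockLen_eq]
          cases hf : findCC tr with
          | none => simp [Nat.add_comm, Nat.add_left_comm]
          | some e => simp [Nat.add_comm, Nat.add_left_comm]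
      · by_cases h3 : c = '"'
        · subst h3
          rw [show spanLen ('"' :: t) = 1 + quoteLen t from by
            rw [spanLen, if_neg (by simp), if_neg (by simp), if_pos rfl]]
          rw [show scanCS ('"' :: t) = some (min (strLen t + 2) (t.length + 1)) from by
            unfold scanCS
            rw [if_neg (by rw [take2_iff]; simp), if_neg (by rw [take2_iff]; simp),
              if_pos (by simp)]
            simp]
          rw [quoteLen_eq]
          simp <;> omega
        · rw [show spanLen (c :: t) = 0 from by
            rw [spanLen, if_neg h1, if_neg h2, if_neg h3]]
          rw [show scanCS (c :: t) = none from by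
            unfold scanCS
            rw [if_neg (by rw [take2_iff]; exact h1), if_neg (by rw [take2_iff]; exact h2),
              if_neg (by simp [h3])]]
          rfl

theorem scanCS_of_spanLen_zero {s : List Char} (h : spanLen s = 0) : scanCS s = none := by
  cases hs : scanCS s with
  | none => rfl
  | some k =>
    exfalso
    have := spanLen_eq s
    rw [hs] at this
    simp at this
    have := scanCS_pos hs
    omega

theorem scanCS_of_spanLen_pos {s : List Char} (h : ¬ spanLen s = 0) :
    scanCS s = some (spanLen s) := by
  cases hs : scanCS s with
  | none =>
    exfalso
    have := spanLen_eq s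
    rw [hs] at this
    exact h this
  | some k =>
    have := spanLen_eq s
    rw [hs] at this
    simp at this
    rw [this]

-- tokenize unfold lemmas, phrased through scanCS
theorem tokenize_eq_some {c : Char} {t : List Char} {k : Nat} (hs : scanCS (c :: t) = some k) :
    tokenize (c :: t) = .prot ((c :: t).take k) :: tokenize ((c :: t).drop k) := by
  have hp : spanLen (c :: t) = k := by rw [spanLen_eq, hs]; rfl
  have hk : ¬ spanLen (c :: t) = 0 := by have := scanCS_pos hs; omega
  rw [tokenize, dif_neg hk, hp]

theorem tokenize_eq_none {c : Char} {t : List Char} (hs : scanCS (c :: t) = none) :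
    tokenize (c :: t) =
      (if isWordChar c then
        .word (c :: t.takeWhile isWordChar) :: tokenize (t.dropWhile isWordChar)
      else .ch c :: tokenize t) := by
  have hp : spanLen (c :: t) = 0 := by rw [spanLen_eq, hs]; rfl
  rw [tokenize, dif_pos hp]

theorem tokenize_eq_ch {c : Char} {t : List Char} (hs : scanCS (c :: t) = none)
    (hw : isWordChar c = false) : tokenize (c :: t) = .ch c :: tokenize t := by
  rw [tokenize_eq_none hs, if_neg (by simp [hw])]

theorem tokenize_eq_chof {c : Char} {t : List Char} (h1 : c ≠ '/') (h2 : c ≠ '"')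
    (h3 : isWordChar c = false) : tokenize (c :: t) = .ch c :: tokenize t :=
  tokenize_eq_ch (scanCS_none_of h1 h2) h3

-- the last character of a consumed comment/string span is never a word character
-- (or the span runs to the end of the text)
theorem scanCS_last {s : List Char} {k : Nat} (h : scanCS s = some k) :
    s.drop k = [] ∨ ∃ c, s[k - 1]? = some c ∧ isWordChar c = false := by
  unfold scanCS at h
  split_ifs at h with h1 h2 h3
  · cases hf : findNl s with
    | none => rw [hf] at h; simp at h; left; simp [h]
    | some e =>
      rw [hf] at h; simp at h
      right
      exact ⟨'\n', by subst h; simpa using findNl_spec hf, by decide⟩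
  · cases hf : findCC (s.drop 2) with
    | none => rw [hf] at h; simp at h; left; simp [h]
    | some e =>
      rw [hf] at h; simp at h
      right
      refine ⟨'/', ?_, by decide⟩
      have := findCC_spec hf
      subst h
      rw [show e + 4 - 1 = 2 + (e + 1) by omega]
      simpa [List.getElem?_drop] using this
  · cases s with
    | nil => simp at h3
    | cons c0 t0 =>
      simp at h3
      simp at h
      rcases strLen_spec t0 with hsp | hsp
      · left
        have : k = (c0 :: t0).length := by simp; omega
        simp [this]
      · right
        refine ⟨'"', ?_, by decide⟩
        have hlt : strLen t0 < t0.length := by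
          by_contra hc
          rw [List.getElem?_eq_none (by omega)] at hsp
          cases hsp
        have hk : k = strLen t0 + 2 := by omega
        subst hk
        simpa using hsp

-- pW only matters when the suffix starts with a word character ('f' of 'forall')
theorem loopA_prev_irrel {s : List Char} (stub : Bool)
    (h : ∀ c, s.head? = some c → isWordChar c = false) :
    loopA stub true s = loopA stub false s := by
  cases s with
  | nil => simp [loopA]
  | cons c t =>
    have hw : isWordChar c = false := h c rfl
    cases hs : scanCS (c :: t) with
    | some k => rw [loopA_eq_some hs, loopA_eq_some hs]
    | none =>
      rw [loopA_eq_none hs, loopA_eq_none hs]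
      have h6 : ¬((c :: t).take 6 = forallL) := by
        intro h6
        have : c = 'f' := by
          have := congrArg (·[0]?) h6
          simpa [forallL] using this
        subst this
        exact absurd hw (by decide)
      rw [if_neg (fun hA => h6 hA.1), if_neg (fun hA => h6 hA.1)]

-- a run of word characters is copied verbatim when the previous char is a word char
theorem loopA_word_skip {w : List Char} (rest : List Char) (stub : Bool)
    (hw : ∀ c ∈ w, isWordChar c = true) :
    loopA stub true (w ++ rest) = w ++ loopA stub true rest := by
  induction w with
  | nil => simp
  | cons c w' ih =>
    have hc : isWordChar c = true := hw c (by simp)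
    rw [List.cons_append, loopA_eq_none (scanCS_word_none _ hc),
      if_neg (by simp), hc, ih fun d hd => hw d (by simp [hd])]
    rfl

theorem parenA_word_skip {w : List Char} (rest : List Char) (d : Int)
    (hw : ∀ c ∈ w, isWordChar c = true) :
    parenA (w ++ rest) d = (w ++ (parenA rest d).1, (parenA rest d).2 + w.length) := by
  induction w with
  | nil => simp
  | cons c w' ih =>
    have hc : isWordChar c = true := hw c (by simp)
    obtain ⟨-, -, hpar, hpar2, -, -, -⟩ := word_facts hc
    rw [List.cons_append, parenA_eq_none (scanCS_word_none _ hc) d,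
      if_neg hpar, if_neg hpar2, ih fun e he => hw e (by simp [he])]
    simp
    omega

theorem braceFindA_word_skip {w : List Char} (rest : List Char) (d : Int)
    (hw : ∀ c ∈ w, isWordChar c = true) :
    braceFindA (w ++ rest) d = (braceFindA rest d).map (· + w.length) := by
  induction w with
  | nil => simp
  | cons c w' ih =>
    have hc : isWordChar c = true := hw c (by simp)
    obtain ⟨-, -, -, -, hbr, hbr2, -⟩ := word_facts hc
    rw [List.cons_append, braceFindA_eq_none (scanCS_word_none _ hc) d,
      if_neg hbr, if_neg hbr2, ih fun e he => hw e (by simp [he])]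
    cases braceFindA rest d <;> simp <;> omega

-- whitespace-prefix facts
theorem wsA_le : ∀ s : List Char, wsA s ≤ s.length := by
  intro s; induction s with
  | nil => simp [wsA]
  | cons c t ih => simp only [wsA]; split <;> simp <;> omega

theorem wsA_take_ws : ∀ (s : List Char), ∀ c ∈ s.take (wsA s), isWS c = true := by
  intro s
  induction s with
  | nil => simp [wsA]
  | cons c t ih =>
    by_cases hc : isWS c
    · simp only [wsA, if_pos hc]
      intro d hd
      rw [show 1 + wsA t = wsA t + 1 by omega] at hd
      simp at hd
      rcases hd with rfl | hd
      · exact hc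
      · exact ih d hd
    · simp [wsA, hc]

-- literal bridges between A's char-list constants and B's string literals
theorem forall_toList : "forall".toList = forallL := by decide
theorem foreach_toList : "foreach".toList = foreachL := by decide
theorem stub_toList : "{ 0 == 0; }".toList = stubL := by decide

-- pass-1/pass-2 correspondence: whitespace
theorem tokenize_corr_ws : ∀ s : List Char,
    wsT (tokenize s) = (s.take (wsA s), tokenize (s.drop (wsA s))) := by
  intro s
  induction s using tokenize.induct with
  | case1 => simp [wsT, tokenize, wsA]
  | case2 c t h0 hw ih =>
    have hs : scanCS (c :: t) = none := scanCS_of_spanLen_zero h0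
    have hnw : isWS c = false := (word_facts hw).2.2.2.2.2.2
    have h0' : wsA (c :: t) = 0 := by simp [wsA, hnw]
    rw [h0', List.take_zero, List.drop_zero, tokenize_eq_none hs, if_pos (by simp [hw])]
    simp [wsT]
  | case3 c t h0 hw ih =>
    have hs : scanCS (c :: t) = none := scanCS_of_spanLen_zero h0
    rw [tokenize_eq_ch hs (by simpa using hw)]
    by_cases hws : isWS c
    · simp only [wsT, if_pos hws, ih]
      have h1 : wsA (c :: t) = wsA t + 1 := by simp [wsA, hws]; omega
      rw [h1]
      simp
    · have h0' : wsA (c :: t) = 0 := by simp [wsA, hws]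
      rw [h0']
      simp only [wsT, if_neg hws, List.take_zero, List.drop_zero]
      rw [← tokenize_eq_ch hs (by simpa using hw)]
  | case4 c t h0 ih =>
    have hs : scanCS (c :: t) = some (spanLen (c :: t)) := scanCS_of_spanLen_pos h0
    have hnw : isWS c = false := by
      rcases scanCS_some_head hs with rfl | rfl <;> decide
    have h0' : wsA (c :: t) = 0 := by simp [wsA, hnw]
    rw [h0', List.take_zero, List.drop_zero, tokenize_eq_some hs]
    simp [wsT, ← tokenize_eq_some hs]

theorem tok_head_ch_inv {s : List Char} {c : Char}
    (h : (tokenize s).head? = some (Tok.ch c)) : s.head? = some c := by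
  cases s with
  | nil => simp [tokenize] at h
  | cons c0 t =>
    by_cases h0 : spanLen (c0 :: t) = 0
    · rw [tokenize_eq_none (scanCS_of_spanLen_zero h0)] at h
      by_cases hw : isWordChar c0
      · rw [if_pos (by simp [hw])] at h; simp at h
      · rw [if_neg (by simp at hw ⊢; exact hw)] at h
        simp at h
        simp [h]
    · rw [tokenize_eq_some (scanCS_of_spanLen_pos h0)] at h
      simp at h

theorem tok_head_ch_iff {c : Char} (h1 : c ≠ '/') (h2 : c ≠ '"')
    (h3 : isWordChar c = false) (u : List Char) :
    ((tokenize u).head? = some (Tok.ch c)) ↔ (u.head? = some c) := by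
  constructor
  · exact tok_head_ch_inv
  · intro h
    cases u with
    | nil => simp at h
    | cons c0 t =>
      simp at h
      subst h
      rw [tokenize_eq_chof h1 h2 h3]
      simp

-- pass-1/pass-2 correspondence: the '(...)' copy loop
theorem tokenize_corr_paren : ∀ (s : List Char) (d : Int),
    parenT (tokenize s) d = ((parenA s d).1, tokenize (s.drop (parenA s d).2)) := by
  intro s
  induction s using tokenize.induct with
  | case1 => intro d; simp [parenT, parenA, tokenize]
  | case2 c t h0 hw ih =>
    intro d
    have hs : scanCS (c :: t) = none := scanCS_of_spanLen_zero h0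
    rw [tokenize_eq_none hs, if_pos (by simp [hw])]
    set w := c :: t.takeWhile isWordChar with hwdef
    set r := t.dropWhile isWordChar with hrdef
    have hww : ∀ e ∈ w, isWordChar e = true := by
      intro e he
      rw [hwdef] at he
      rcases List.mem_cons.mp he with rfl | he'
      · exact hw
      · exact List.mem_takeWhile_imp he'
    have hsplit : (c :: t) = w ++ r := by
      rw [hwdef, hrdef]
      simp [List.takeWhile_append_dropWhile]
    have hA : parenA (c :: t) d = (w ++ (parenA r d).1, (parenA r d).2 + w.length) := by
      conv_lhs => rw [hsplit]
      exact parenA_word_skip r d hww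
    rw [hA]
    simp only [parenT, ih d, Prod.mk.injEq]
    refine ⟨trivial, ?_⟩
    conv_rhs => rw [hsplit]
    rw [show (parenA r d).2 + w.length = w.length + (parenA r d).2 by omega,
      List.drop_length_add_append]
  | case3 c t h0 hw ih =>
    intro d
    have hs : scanCS (c :: t) = none := scanCS_of_spanLen_zero h0
    have hwf : isWordChar c = false := by simpa using hw
    rw [tokenize_eq_ch hs hwf, parenA_eq_none hs]
    simp only [parenT]
    split_ifs with h1 h2 h3
    · simp [ih (d + 1)]
    · simp
    · simp [ih (d - 1)]
    · simp [ih d]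
  | case4 c t h0 ih =>
    intro d
    have hs : scanCS (c :: t) = some (spanLen (c :: t)) := scanCS_of_spanLen_pos h0
    rw [tokenize_eq_some hs, parenA_eq_some hs]
    simp only [parenT, ih d, Prod.mk.injEq]
    refine ⟨trivial, ?_⟩
    rw [List.drop_drop]

-- pass-1/pass-2 correspondence: brace matching
theorem tokenize_corr_brace : ∀ (s : List Char) (d : Int),
    (match braceFindA s d with
      | some j => braceT (tokenize s) d = some (tokenize (s.drop (j + 1)))
      | none => braceT (tokenize s) d = none) := by
  intro s
  induction s using tokenize.induct with
  | case1 => intro d; simp [braceFindA, braceT, tokenize]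
  | case2 c t h0 hw ih =>
    intro d
    have hs : scanCS (c :: t) = none := scanCS_of_spanLen_zero h0
    rw [tokenize_eq_none hs, if_pos (by simp [hw])]
    set w := c :: t.takeWhile isWordChar with hwdef
    set r := t.dropWhile isWordChar with hrdef
    have hww : ∀ e ∈ w, isWordChar e = true := by
      intro e he
      rw [hwdef] at he
      rcases List.mem_cons.mp he with rfl | he'
      · exact hw
      · exact List.mem_takeWhile_imp he'
    have hsplit : (c :: t) = w ++ r := by
      rw [hwdef, hrdef]
      simp [List.takeWhile_append_dropWhile]
    have hB : braceFindA (c :: t) d = (braceFindA r d).map (· + w.length) := by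
      conv_lhs => rw [hsplit]
      exact braceFindA_word_skip r d hww
    rw [hB]
    have hih := ih d
    cases hb : braceFindA r d with
    | none =>
      rw [hb] at hih
      simp [braceT, hih]
    | some j =>
      rw [hb] at hih
      simp only [Option.map_some]
      rw [show braceT (Tok.word w :: tokenize r) d = braceT (tokenize r) d from by
        simp [braceT]]
      rw [hih]
      congr 1
      conv_rhs => rw [hsplit]
      rw [show j + w.length + 1 = w.length + (j + 1) by omega, List.drop_length_add_append]
  | case3 c t h0 hw ih =>
    intro d
    have hs : scanCS (c :: t) = none := scanCS_of_spanLen_zero h0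
    have hwf : isWordChar c = false := by simpa using hw
    rw [tokenize_eq_ch hs hwf, braceFindA_eq_none hs]
    simp only [braceT]
    split_ifs with h1 h2 h3
    · have hih := ih (d + 1)
      cases hb : braceFindA t (d + 1) with
      | none => rw [hb] at hih; simp [hih]
      | some j => rw [hb] at hih; simpa using hih
    · simp
    · have hih := ih (d - 1)
      cases hb : braceFindA t (d - 1) with
      | none => rw [hb] at hih; simp [hih]
      | some j => rw [hb] at hih; simpa using hih
    · have hih := ih d
      cases hb : braceFindA t d with
      | none => rw [hb] at hih; simp [hih]
      | some j => rw [hb] at hih; simpa using hih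
  | case4 c t h0 ih =>
    intro d
    have hs : scanCS (c :: t) = some (spanLen (c :: t)) := scanCS_of_spanLen_pos h0
    rw [tokenize_eq_some hs, braceFindA_eq_some hs]
    have hih := ih d
    cases hb : braceFindA ((c :: t).drop (spanLen (c :: t))) d with
    | none =>
      rw [hb] at hih
      simp [braceT, hih]
    | some j =>
      rw [hb] at hih
      simp only [Option.map_some]
      rw [show braceT (Tok.prot ((c :: t).take (spanLen (c :: t))) :: tokenize ((c :: t).drop (spanLen (c :: t)))) d = braceT (tokenize ((c :: t).drop (spanLen (c :: t)))) d from by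
        simp [braceT]]
      rw [hih, List.drop_drop,
        show spanLen (c :: t) + (j + 1) = j + spanLen (c :: t) + 1 by omega]

-- the matching brace really is a '}'
theorem braceFindA_get : ∀ {s : List Char} {d : Int} {j : Nat},
    braceFindA s d = some j → s[j]? = some '}' := by
  intro s d j h
  induction s, d using braceFindA.induct generalizing j with
  | case1 x => simp [braceFindA] at h
  | case2 c t depth k hs ih =>
    rw [braceFindA_eq_some hs] at h
    rw [Nat.max_eq_right (scanCS_pos hs).1] at ih
    cases hb : braceFindA ((c :: t).drop k) depth with
    | none => rw [hb] at h; cases h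
    | some j' =>
      rw [hb] at h
      simp at h
      subst h
      have := ih hb
      rw [List.getElem?_drop] at this
      rw [show j' + k = k + j' by omega]
      exact this
  | case3 t depth hs ih =>
    rw [braceFindA_eq_none hs, if_pos rfl] at h
    cases hb : braceFindA t (depth + 1) with
    | none => rw [hb] at h; cases h
    | some j' =>
      rw [hb] at h; simp at h; subst h
      simpa using ih hb
  | case4 t depth hd hs hne =>
    rw [braceFindA_eq_none hs, if_neg (by decide), if_pos rfl, if_pos hd] at h
    simp at h
    subst h
    simp
  | case5 t depth hd hs hne ih =>
    rw [braceFindA_eq_none hs, if_neg (by decide), if_pos rfl, if_neg hd] at h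
    cases hb : braceFindA t (depth - 1) with
    | none => rw [hb] at h; cases h
    | some j' =>
      rw [hb] at h; simp at h; subst h
      simpa using ih hb
  | case6 c t depth hs h1 h2 ih =>
    rw [braceFindA_eq_none hs, if_neg h1, if_neg h2] at h
    cases hb : braceFindA t depth with
    | none => rw [hb] at h; cases h
    | some j' =>
      rw [hb] at h; simp at h; subst h
      simpa using ih hb

-- when the paren loop stops before the end of the text, the last emitted char is ')'
theorem parenA_last : ∀ (s : List Char) (d : Int),
    s.length ≤ (parenA s d).2 ∨ (parenA s d).1.getLast? = some ')' := by
  intro s d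
  induction s, d using parenA.induct with
  | case1 x => left; simp [parenA]
  | case2 c t depth k hs ih =>
    rw [parenA_eq_some hs]
    rw [Nat.max_eq_right (scanCS_pos hs).1] at ih
    rcases ih with ih1 | ih1
    · left
      have hk := scanCS_pos hs
      simp at ih1 ⊢
      omega
    · right
      simp only
      rw [List.getLast?_append_of_ne_nil _ (by intro hc; simp [hc] at ih1)]
      exact ih1
  | case3 t depth hs ih =>
    rw [parenA_eq_none hs, if_pos rfl]
    rcases ih with ih1 | ih1
    · left; simp; omega
    · right
      simp only
      rw [show ('(' :: (parenA t (depth + 1)).1) = ['('] ++ (parenA t (depth + 1)).1 by simp]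
      rw [List.getLast?_append_of_ne_nil _ (by intro hc; simp [hc] at ih1)]
      exact ih1
  | case4 t depth hd hs hne =>
    rw [parenA_eq_none hs, if_neg (by decide), if_pos rfl, if_pos hd]
    right; simp
  | case5 t depth hd hs hne ih =>
    rw [parenA_eq_none hs, if_neg (by decide), if_pos rfl, if_neg hd]
    rcases ih with ih1 | ih1
    · left; simp; omega
    · right
      simp only
      rw [show (')' :: (parenA t (depth - 1)).1) = [')'] ++ (parenA t (depth - 1)).1 by simp]
      rw [List.getLast?_append_of_ne_nil _ (by intro hc; simp [hc] at ih1)]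
      exact ih1
  | case6 c t depth hs h1 h2 ih =>
    rw [parenA_eq_none hs, if_neg h1, if_neg h2]
    rcases ih with ih1 | ih1
    · left; simp; omega
    · right
      simp only
      rw [show (c :: (parenA t depth).1) = [c] ++ (parenA t depth).1 by simp]
      rw [List.getLast?_append_of_ne_nil _ (by intro hc; simp [hc] at ih1)]
      exact ih1

-- brace-step correspondence
theorem braceStep_corr (s3 : List Char) :
    braceStepT (tokenize s3) = ((braceStepA s3).1, tokenize (s3.drop (braceStepA s3).2.1)) := by
  unfold braceStepA
  by_cases hb : s3.head? = some '{'
  · cases s3 with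
    | nil => simp at hb
    | cons c0 tt =>
      simp at hb
      subst hb
      have htok : tokenize ('{' :: tt) = .ch '{' :: tokenize tt :=
        tokenize_eq_chof (by decide) (by decide) (by decide)
      rw [htok, if_pos (by simp)]
      rw [braceFindA_eq_none (scanCS_none_of (by decide) (by decide)), if_pos rfl,
        show (0 : Int) + 1 = 1 by norm_num]
      simp only [braceStepT, if_pos rfl]
      have hcb := tokenize_corr_brace tt 1
      cases hbf : braceFindA tt 1 with
      | none =>
        rw [hbf] at hcb
        rw [hcb]
        simp
      | some j =>
        rw [hbf] at hcb
        rw [hcb]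
        simp [stub_toList]
  · rw [if_neg hb]
    simp only [List.drop_zero]
    cases htok : tokenize s3 with
    | nil => simp [braceStepT, ← htok]
    | cons a ts =>
      cases a with
      | prot cs => simp [braceStepT, ← htok]
      | word w => simp [braceStepT, ← htok]
      | ch c =>
        have hc : c ≠ '{' := by
          intro hc
          subst hc
          exact hb (tok_head_ch_inv (by rw [htok]; rfl))
        simp [braceStepT, hc, ← htok]

-- full stub-block correspondence
theorem tokenize_corr_stub (s : List Char) :
    stubT (tokenize s) = ((stubA s).1, tokenize (s.drop (stubA s).2.1)) := by
  unfold stubT stubA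
  simp only [tokenize_corr_ws s]
  have hguard : ((tokenize (s.drop (wsA s))).head? = some (Tok.ch '(')) ↔
      ((s.drop (wsA s)).head? = some '(') :=
    tok_head_ch_iff (by decide) (by decide) (by decide) _
  by_cases hpar : (s.drop (wsA s)).head? = some '('
  · rw [if_pos (hguard.mpr hpar), if_pos hpar,
      tokenize_corr_paren (s.drop (wsA s)) 0,
      tokenize_corr_ws ((s.drop (wsA s)).drop (parenA (s.drop (wsA s)) 0).2),
      braceStep_corr]
    simp only [List.drop_drop]
  · rw [if_neg (fun hc => hpar (hguard.mp hc)), if_neg hpar]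
    simp only [List.drop_zero]
    rw [tokenize_corr_ws (s.drop (wsA s)), braceStep_corr]
    simp only [Prod.mk.injEq, List.drop_drop]
    refine ⟨by simp, ?_⟩
    congr 2
    all_goals omega

-- classification of the stub step's last consumed char / rest
theorem braceStep_classify (s3 : List Char) :
    ((braceStepA s3).2.2 = none ∧ (braceStepA s3).2.1 = 0) ∨
    (∃ c, (braceStepA s3).2.2 = some c ∧ isWordChar c = false) := by
  unfold braceStepA
  by_cases hb : s3.head? = some '{'
  · rw [if_pos hb]
    cases hbf : braceFindA s3 0 with
    | none => right; exact ⟨'{', by simp [hb], by decide⟩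
    | some j =>
      right
      refine ⟨'}', ?_, by decide⟩
      simp [braceFindA_get hbf]
  · rw [if_neg hb]
    left; exact ⟨rfl, rfl⟩

theorem stubA_classify (s : List Char) :
    ((stubA s).2.2 = none ∧ (stubA s).2.1 = 0) ∨
    (∃ c, (stubA s).2.2 = some c ∧ isWordChar c = false) ∨ s.length ≤ (stubA s).2.1 := by
  unfold stubA
  simp only
  set k1 := wsA s with hk1
  set s1 := s.drop k1 with hs1
  set p := (if s1.head? = some '(' then parenA s1 0 else ([], 0)) with hp
  set s2 := s1.drop p.2 with hs2
  set k3 := wsA s2 with hk3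
  set s3 := s2.drop k3 with hs3
  rcases braceStep_classify s3 with ⟨hbn, hbz⟩ | ⟨c, hbc, hbw⟩
  swap
  · right; left
    exact ⟨c, by rw [hbc]; rfl, hbw⟩
  rw [hbn]
  simp only [Option.or]
  by_cases h3 : k3 = 0
  · -- no trailing whitespace consumed
    by_cases hpp : s1.head? = some '('
    · rcases parenA_last s1 0 with hpe | hpl
      · right; right
        rw [hbz, hp, if_pos hpp]
        have hlen1 : s1.length = s.length - k1 := by rw [hs1]; simp
        have hk1le : k1 ≤ s.length := by rw [hk1]; exact wsA_le s
        omega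
      · right; left
        refine ⟨')', ?_, by decide⟩
        rw [h3]
        simp only [List.take_zero, List.getLast?_nil]
        rw [hp, if_pos hpp] at *
        simp [Option.or, hpl]
    · -- no paren: p = ([], 0)
      rw [hp, if_neg hpp] at *
      simp only [List.getLast?_nil, Option.or] at *
      by_cases h1 : k1 = 0
      · left
        refine ⟨?_, ?_⟩
        · rw [h3, h1]; simp
        · rw [hbz, h3, h1]
      · right; left
        have hne : (s.take k1).getLast? ≠ none := by
          have hlen : (s.take k1).length = k1 := by
            rw [List.length_take]
            have := wsA_le s
            rw [hk1] at *
            omega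
          intro hc
          rw [List.getLast?_eq_none_iff] at hc
          rw [hc] at hlen
          simp at hlen
          omega
        cases hg : (s.take k1).getLast? with
        | none => exact absurd hg hne
        | some c =>
          refine ⟨c, ?_, ?_⟩
          · rw [h3]; simp [hg]
          · have hmem : c ∈ s.take k1 := List.mem_of_getLast? hg
            exact (ws_facts (wsA_take_ws s c hmem)).2.2.2.2
  · -- trailing whitespace consumed: its last char is whitespace
    right; left
    have hlen : (s2.take k3).length = k3 := by
      rw [List.length_take]
      have := wsA_le s2
      rw [hk3] at *
      omega
    have hne : (s2.take k3).getLast? ≠ none := by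
      intro hc
      rw [List.getLast?_eq_none_iff] at hc
      rw [hc] at hlen
      simp at hlen
      omega
    cases hg : (s2.take k3).getLast? with
    | none => exact absurd hg hne
    | some c =>
      refine ⟨c, by simp [hg], ?_⟩
      have hmem : c ∈ s2.take k3 := List.mem_of_getLast? hg
      exact (ws_facts (wsA_take_ws s2 c hmem)).2.2.2.2

theorem dropWhile_head_neg {p : Char → Bool} {l : List Char} {c : Char}
    (h : (l.dropWhile p).head? = some c) : p c = false := by
  induction l with
  | nil => simp at h
  | cons a t ih =>
    rw [List.dropWhile_cons] at h
    split at h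
    · exact ih h
    · simp at h; subst h; simp_all

theorem forallL_words : ∀ c ∈ forallL, isWordChar c = true := by
  intro c hc
  fin_cases hc <;> decide

-- word-boundary characterisation: a maximal word run matches A's 'forall' test
-- exactly when the whole run is the word 'forall'
theorem forall_take6 {w rest : List Char} (hw : ∀ c ∈ w, isWordChar c = true)
    (hrest : ∀ c, rest.head? = some c → isWordChar c = false) :
    ((w ++ rest).take 6 = forallL ∧
      (((w ++ rest)[6]?).all fun a => !isWordChar a) = true) ↔ w = forallL := by
  constructor
  · rintro ⟨h6, hall⟩
    rcases lt_trichotomy w.length 6 with hlt | heq | hgt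
    · exfalso
      have hidx : (w ++ rest)[w.length]? = rest[0]? := by
        simp [List.getElem?_append_right]
      have h1 : (w ++ rest)[w.length]? = forallL[w.length]? := by
        rw [← List.getElem?_take_of_lt (l := w ++ rest) hlt, h6]
      cases hr0 : rest[0]? with
      | none =>
        rw [hidx, hr0] at h1
        have : w.length < forallL.length := by simpa [forallL] using hlt
        rw [List.getElem?_eq_getElem this] at h1
        cases h1
      | some c =>
        have hcw : isWordChar c = false := hrest c (by
          cases rest with
          | nil => simp at hr0
          | cons d r' => simpa using hr0)
        rw [hidx, hr0] at h1
        have : w.length < forallL.length := by simpa [forallL] using hlt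
        rw [List.getElem?_eq_getElem this] at h1
        have hmem : forallL[w.length] ∈ forallL := List.getElem_mem this
        have := forallL_words _ hmem
        cases h1
        rw [this] at hcw
        cases hcw
    · rw [List.take_append_of_le_length (by omega), show (6 : Nat) = w.length from heq.symm,
        List.take_length] at h6
      exact h6
    · exfalso
      have hidx : (w ++ rest)[6]? = w[6]? := List.getElem?_append_left hgt
      rw [hidx] at hall
      cases hg : w[6]? with
      | none => rw [List.getElem?_eq_none_iff] at hg; omega
      | some c =>
        rw [hg] at hall
        have hmem : c ∈ w := List.mem_of_getElem? hg
        have := hw c hmem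
        simp [this] at hall
  · rintro rfl
    refine ⟨?_, ?_⟩
    · rw [List.take_append_of_le_length (by decide), show (6 : Nat) = forallL.length from rfl,
        List.take_length]
    · have hidx : (forallL ++ rest)[6]? = rest[0]? := by
        simp [forallL, List.getElem?_append_right]
      rw [hidx]
      cases hr0 : rest[0]? with
      | none => simp
      | some c =>
        have : isWordChar c = false := hrest c (by
          cases rest with
          | nil => simp at hr0
          | cons d r' => simpa using hr0)
        simp [this]

theorem main_equiv : ∀ (stub : Bool) (s : List Char),
    loopA stub false s = pass2 stub (tokenize s) := by
  intro stub
  suffices H : ∀ (n : Nat) (s : List Char), s.length ≤ n →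
      loopA stub false s = pass2 stub (tokenize s) from fun s => H s.length s le_rfl
  intro n
  induction n with
  | zero =>
    intro s hl
    have hnil : s = [] := by cases s <;> simp_all
    subst hnil
    simp [loopA, tokenize, pass2]
  | succ n ih =>
    intro s hl
    cases s with
    | nil => simp [loopA, tokenize, pass2]
    | cons c t =>
      cases hs : scanCS (c :: t) with
      | some k =>
        rw [loopA_eq_some hs, tokenize_eq_some hs]
        have hk := scanCS_pos hs
        rw [show pass2 stub (Tok.prot ((c :: t).take k) :: tokenize ((c :: t).drop k)) =
          (c :: t).take k ++ pass2 stub (tokenize ((c :: t).drop k)) from by rw [pass2]]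
        congr 1
        rcases scanCS_last hs with hend | ⟨d, hd, hdw⟩
        · rw [hend]
          simp [loopA, tokenize, pass2]
        · rw [hd]
          simp only [Option.map_some, Option.getD_some]
          rw [hdw]
          exact ih _ (by simp at hl ⊢; omega)
      | none =>
        cases hhw : isWordChar c with
        | true =>
          set w := c :: t.takeWhile isWordChar with hwdef
          set r := t.dropWhile isWordChar with hrdef
          have hww : ∀ e ∈ w, isWordChar e = true := by
            intro e he
            rw [hwdef] at he
            rcases List.mem_cons.mp he with rfl | he'
            · exact hhw
            · exact List.mem_takeWhile_imp he'
          have hsplit : (c :: t) = w ++ r := by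
            rw [hwdef, hrdef]
            simp [List.takeWhile_append_dropWhile]
          have hr : ∀ e, r.head? = some e → isWordChar e = false := by
            intro e he
            rw [hrdef] at he
            exact dropWhile_head_neg he
          have hrlen : r.length ≤ t.length := by
            rw [hrdef]; exact List.length_dropWhile_le _ _
          have hln : t.length ≤ n := by simpa using hl
          rw [tokenize_eq_none hs, if_pos (by simp [hhw])]
          by_cases hf : w = forallL
          · have hcond := (forall_take6 hww hr).mpr hf
            rw [← hsplit] at hcond
            rw [loopA_eq_none hs, if_pos ⟨hcond.1, rfl, hcond.2⟩]
            rw [show pass2 stub (Tok.word w :: tokenize r) =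
              "foreach".toList ++ (if stub then
                (stubT (tokenize r)).1 ++ pass2 stub (stubT (tokenize r)).2
              else pass2 stub (tokenize r)) from by
                rw [pass2, if_pos (by rw [forall_toList]; exact hf)]]
            have hdrop6 : (c :: t).drop 6 = r := by
              rw [hsplit, hf]
              simp [forallL]
            rw [foreach_toList]
            congr 1
            cases stub with
            | false =>
              simp only [Bool.false_eq_true, if_false]
              rw [hdrop6, loopA_prev_irrel _ hr]
              exact ih r (le_trans hrlen hln)
            | true =>
              simp only [if_true]
              rw [hdrop6, tokenize_corr_stub r]
              congr 1
              have hdropq : (c :: t).drop (6 + (stubA r).2.1) = r.drop (stubA r).2.1 := by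
                rw [← hdrop6, ← List.drop_drop]
              rw [hdropq]
              rcases stubA_classify r with ⟨hn0, hz⟩ | ⟨d, hd, hdw⟩ | hbig
              · rw [hn0, hz, List.drop_zero]
                rw [loopA_prev_irrel _ hr]
                exact ih r (le_trans hrlen hln)
              · rw [hd]
                show loopA true (isWordChar d) (r.drop (stubA r).2.1) =
                  pass2 true (tokenize (r.drop (stubA r).2.1))
                rw [hdw]
                refine ih _ (le_trans ?_ (le_trans hrlen hln))
                simp
              · rw [List.drop_eq_nil_of_le hbig]
                simp [loopA, tokenize, pass2]
          · have hcond : ¬((c :: t).take 6 = forallL ∧ (false = false) ∧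
                (((c :: t)[6]?).all fun a => !isWordChar a) = true) := by
              rintro ⟨h1, -, h3⟩
              rw [hsplit] at h1 h3
              exact hf ((forall_take6 hww hr).mp ⟨h1, h3⟩)
            rw [loopA_eq_none hs, if_neg hcond]
            rw [show pass2 stub (Tok.word w :: tokenize r) = w ++ pass2 stub (tokenize r)
              from by rw [pass2, if_neg (by rw [forall_toList]; exact hf)]]
            have htsplit : t = t.takeWhile isWordChar ++ r := by
              rw [hrdef]
              exact (List.takeWhile_append_dropWhile).symm
            have htww : ∀ e ∈ t.takeWhile isWordChar, isWordChar e = true :=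
              fun e he => List.mem_takeWhile_imp he
            rw [hhw, hwdef]
            simp only [List.cons_append]
            congr 1
            conv_lhs => rw [htsplit]
            rw [loopA_word_skip _ _ htww, loopA_prev_irrel _ hr]
            congr 1
            exact ih r (le_trans hrlen hln)
        | false =>
          rw [tokenize_eq_ch hs hhw]
          have h6 : ¬((c :: t).take 6 = forallL ∧ (false = false) ∧
              (((c :: t)[6]?).all fun a => !isWordChar a) = true) := by
            rintro ⟨h1, -, -⟩
            have hc : c = 'f' := by
              have := congrArg (·[0]?) h1
              simpa [forallL] using this
            subst hc
            exact absurd hhw (by decide)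
          rw [loopA_eq_none hs, if_neg h6]
          rw [show pass2 stub (Tok.ch c :: tokenize t) = c :: pass2 stub (tokenize t)
            from by rw [pass2]]
          rw [hhw]
          exact congrArg (c :: ·) (ih t (by simpa using hl))

-- ===== VERDICT (by name: the statement is the Claim_ definition above) =====
theorem transform_forall_foreach_py_spec : Claim_equal_transform_forall_foreach_py := by
  intro text stub_body _
  unfold Spec_transform_forall_foreach_py transform_forall_foreach_py transform_forall_foreach_py_alt
  exact congrArg String.ofList (main_equiv stub_body text.toList)
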